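-- pv_equiv track=rewrite | github.com/JairGF05/identificador_relaciones | functions.py | cotas_superiores
-- ===== SOURCE A (Python) =====
-- def cotas_superiores(poset,conjunto):
--     cs = []
--     for number in poset:
--         isCotaSuperior = True
--         for element in conjunto:
--             if (number > element):
--                 if (number % element != 0):
--                     isCotaSuperior = False
--             else:
--                 isCotaSuperior = False
--         if (isCotaSuperior):
--             cs.append(number)
--             isCotaSuperior = True
--     return cs
-- ===== SOURCE B (Python) =====
-- def cotas_superiores(poset, conjunto):
--     if not conjunto:
--         return list(poset)
--     m = max(conjunto)
--     l = 1
--     for e in conjunto: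
--         g = abs(e)
--         a, b = l, g
--         while b:
--             a, b = b, a % b
--         l = 0 if a == 0 else (l * g) // a
--     return [n for n in poset if n > m and n % l == 0]
-- ===== Notes on version B (the rewrite author's own statement) =====
-- stated objective: faster
-- what changed: Replaces the nested per-number scan of conjunto by precomputing max(conjunto) and lcm(conjunto) once, then filtering poset in a single pass with n > max and n % lcm == 0.
import Mathlib
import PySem

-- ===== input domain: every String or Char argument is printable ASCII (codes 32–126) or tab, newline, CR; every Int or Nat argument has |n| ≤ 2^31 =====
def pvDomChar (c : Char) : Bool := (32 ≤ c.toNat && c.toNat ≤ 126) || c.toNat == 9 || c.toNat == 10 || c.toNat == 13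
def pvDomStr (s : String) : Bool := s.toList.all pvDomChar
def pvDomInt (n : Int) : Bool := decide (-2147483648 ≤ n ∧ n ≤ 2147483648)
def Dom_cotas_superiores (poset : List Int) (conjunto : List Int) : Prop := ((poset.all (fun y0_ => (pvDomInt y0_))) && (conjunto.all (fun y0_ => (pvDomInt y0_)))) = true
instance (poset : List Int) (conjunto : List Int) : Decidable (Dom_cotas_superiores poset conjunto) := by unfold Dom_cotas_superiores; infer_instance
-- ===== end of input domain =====

-- B replaces A's quadratic per-element scan by precomputing max(conjunto) and lcm(conjunto) once
-- and filtering poset in one pass (n > max and n % lcm == 0); return value equivalence only.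

-- ===== PORT A =====
def cotas_superiores (poset : List Int) (conjunto : List Int) : List Int :=
  poset.foldl (fun cs number =>
    let isCotaSuperior :=
      conjunto.foldl (fun isCS element =>
        if element < number then
          if PySem.Int.mod number element ≠ 0 then false else isCS
        else false) true
    if isCotaSuperior then cs ++ [number] else cs) []

-- ===== PORT B =====
-- hand-written Euclid loop from Source B: `while b: a, b = b, a % b`; returns a
def pyGcd (a b : Int) : Int :=
  if _h : b = 0 then a else pyGcd b (PySem.Int.mod a b)
termination_by b.natAbs
decreasing_by
  rcases lt_trichotomy b 0 with hb | hb | hb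
  · have h2 := PySem.Int.mod_neg_bounds (a := a) hb
    omega
  · omega
  · have h1 := PySem.Int.mod_nonneg (a := a) hb
    have h2 := PySem.Int.mod_lt (a := a) hb
    omega

def cotas_superiores_alt (poset : List Int) (conjunto : List Int) : List Int :=
  match conjunto with
  | [] => poset
  | c :: rest =>
    let m := (PySem.List.max? (c :: rest) (fun y => y)).getD 0
    let l := (c :: rest).foldl (fun l e =>
        if pyGcd l |e| = 0 then 0 else PySem.Int.floordiv (l * |e|) (pyGcd l |e|)) 1
    poset.filter (fun n => decide (m < n) && (PySem.Int.mod n l == 0))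

-- ===== PRECONDITION & SPEC =====
-- Pre_ excludes exactly the inputs on which A raises ZeroDivisionError:
-- 0 ∈ conjunto together with some positive number in poset (the inner loop evaluates number % 0).
def Pre_cotas_superiores (poset : List Int) (conjunto : List Int) : Prop :=
  (0 : Int) ∈ conjunto → ∀ n ∈ poset, n ≤ 0
instance (poset : List Int) (conjunto : List Int) : Decidable (Pre_cotas_superiores poset conjunto) := by unfold Pre_cotas_superiores; infer_instance

def pvWitness_cotas_superiores : List Int × List Int := ([6, 4, 2, 12], [1, 2])

def Spec_cotas_superiores (poset : List Int) (conjunto : List Int) (out : List Int) : Prop := out = cotas_superiores_alt poset conjunto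
instance (poset : List Int) (conjunto : List Int) (out : List Int) : Decidable (Spec_cotas_superiores poset conjunto out) := by unfold Spec_cotas_superiores; infer_instance

-- ===== CLAIM (what is proved, stated in full; the proofs are below) =====
def Claim_equal_cotas_superiores : Prop := ∀ (poset : List Int) (conjunto : List Int), Dom_cotas_superiores poset conjunto → Pre_cotas_superiores poset conjunto → Spec_cotas_superiores poset conjunto (cotas_superiores poset conjunto)

-- ===== LEMMAS AND PROOFS =====

-- A's inner loop is the decidable conjunction over conjunto
theorem inner_fold_eq (c : List Int) (n : Int) (b : Bool) :
    (c.foldl (fun isCS element =>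
        if element < n then
          if PySem.Int.mod n element ≠ 0 then false else isCS
        else false) b)
      = (b && decide (∀ e ∈ c, e < n ∧ PySem.Int.mod n e = 0)) := by
  induction c generalizing b with
  | nil => simp
  | cons e c ih =>
    simp only [List.foldl_cons, ih]
    by_cases h1 : e < n <;> by_cases h2 : PySem.Int.mod n e = 0 <;>
      simp [h1, h2]

-- A is a filter
theorem A_eq_filter (poset conjunto : List Int) :
    cotas_superiores poset conjunto
      = poset.filter (fun n => decide (∀ e ∈ conjunto, e < n ∧ PySem.Int.mod n e = 0)) := by
  unfold cotas_superiores
  suffices h : ∀ acc : List Int,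
      poset.foldl (fun cs number =>
        let isCotaSuperior :=
          conjunto.foldl (fun isCS element =>
            if element < number then
              if PySem.Int.mod number element ≠ 0 then false else isCS
            else false) true
        if isCotaSuperior then cs ++ [number] else cs) acc
      = acc ++ poset.filter (fun n => decide (∀ e ∈ conjunto, e < n ∧ PySem.Int.mod n e = 0)) by
    simpa using h []
  induction poset with
  | nil => simp
  | cons n p ih =>
    intro acc
    rw [List.foldl_cons, inner_fold_eq]
    by_cases hn : ∀ e ∈ conjunto, e < n ∧ PySem.Int.mod n e = 0
    · rw [if_pos (by simpa using hn), ih, List.filter_cons, if_pos (by simpa using hn)]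
      simp
    · rw [if_neg (by simpa using hn), ih, List.filter_cons, if_neg (by simpa using hn)]

-- B's hand-written Euclid loop computes gcd on nonnegative arguments
theorem pyGcd_eq (b a : Int) (ha : 0 ≤ a) (hb : 0 ≤ b) :
    pyGcd a b = (Int.gcd a b : Int) := by
  rcases eq_or_lt_of_le hb with hb0 | hbpos
  · rw [pyGcd, dif_pos hb0.symm, ← hb0]
    simp [Int.gcd, Int.natAbs_of_nonneg ha]
  · rw [pyGcd, dif_neg (show ¬ b = 0 by omega)]
    have hmod : PySem.Int.mod a b = a % b := PySem.Int.mod_eq_emod_of_pos hbpos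
    have := pyGcd_eq (a % b) b (le_of_lt hbpos) (Int.emod_nonneg a (by omega))
    rw [hmod, this]
    rw [Int.gcd_comm b (a % b), Int.gcd_emod]
termination_by b.natAbs
decreasing_by
  have := Int.emod_nonneg a (show b ≠ 0 by omega)
  have := Int.emod_lt_of_pos a hbpos
  omega

-- B's lcm accumulation loop, over a Nat accumulator
theorem lcm_fold_eq (es : List Int) (l : Nat) :
    es.foldl (fun l e =>
        if pyGcd l |e| = 0 then 0 else PySem.Int.floordiv (l * |e|) (pyGcd l |e|)) (l : Int)
      = ((es.foldl (fun acc e => Nat.lcm acc e.natAbs) l : Nat) : Int) := by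
  induction es generalizing l with
  | nil => simp
  | cons e es ih =>
    simp only [List.foldl_cons]
    have hstep : (if pyGcd (l : Int) |e| = 0 then (0 : Int)
          else PySem.Int.floordiv ((l : Int) * |e|) (pyGcd (l : Int) |e|))
        = ((Nat.lcm l e.natAbs : Nat) : Int) := by
      rw [Int.abs_eq_natAbs,
        pyGcd_eq _ _ (Int.natCast_nonneg _) (Int.natCast_nonneg _), Int.gcd_natCast_natCast]
      by_cases h0 : Nat.gcd l e.natAbs = 0
      · rw [if_pos (by exact_mod_cast h0)]
        have hl := Nat.eq_zero_of_gcd_eq_zero_left h0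
        have he := Nat.eq_zero_of_gcd_eq_zero_right h0
        simp [Nat.lcm, hl, he]
      · rw [if_neg (by exact_mod_cast h0),
          show ((l : Int) * ((e.natAbs : Nat) : Int)) = (((l * e.natAbs : Nat)) : Int) by push_cast; ring,
          PySem.Int.floordiv_natCast]
        rfl
    rw [hstep]
    exact ih _

-- divisibility by the folded lcm = divisibility by every element
theorem lcm_fold_dvd (es : List Int) (l : Nat) (n : Int) :
    ((es.foldl (fun acc e => Nat.lcm acc e.natAbs) l : Nat) : Int) ∣ n
      ↔ ((l : Int) ∣ n ∧ ∀ e ∈ es, e ∣ n) := by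
  induction es generalizing l with
  | nil => simp
  | cons e es ih =>
    simp only [List.foldl_cons, ih, List.mem_cons]
    constructor
    · rintro ⟨hlcm, hrest⟩
      have h1 : ((l : Int)) ∣ ((Nat.lcm l e.natAbs : Nat) : Int) := by
        exact_mod_cast Nat.dvd_lcm_left _ _
      have h2 : ((e.natAbs : Nat) : Int) ∣ ((Nat.lcm l e.natAbs : Nat) : Int) := by
        exact_mod_cast Nat.dvd_lcm_right _ _
      refine ⟨h1.trans hlcm, fun x hx => ?_⟩
      rcases hx with rfl | hx
      · exact Int.natAbs_dvd.mp (h2.trans hlcm)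
      · exact hrest x hx
    · rintro ⟨hl, hall⟩
      have he : e ∣ n := hall e (Or.inl rfl)
      have hlcm : ((Nat.lcm l e.natAbs : Nat) : Int) ∣ n := by
        rw [Int.natCast_dvd]
        exact Nat.lcm_dvd (Int.natCast_dvd.mp hl) (Int.natCast_dvd.mp ((Int.natAbs_dvd).mpr he))
      exact ⟨hlcm, fun x hx => hall x (Or.inr hx)⟩

-- ===== VERDICT (by name: the statement is the Claim_ definition above) =====
theorem cotas_superiores_spec : Claim_equal_cotas_superiores := by
  intro poset conjunto _hdom _hpre
  unfold Spec_cotas_superiores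
  rw [A_eq_filter]
  match conjunto with
  | [] =>
    simp [cotas_superiores_alt]
  | c :: rest =>
    have hK := lcm_fold_eq (c :: rest) 1
    rw [show (((1 : Nat) : Int)) = (1 : Int) by norm_num] at hK
    have hmax := PySem.List.max?_id_cons (x := c) (t := rest)
    have hm_mem : rest.foldl max c ∈ c :: rest := PySem.List.max?_mem hmax
    have hm_max : ∀ y ∈ c :: rest, y ≤ rest.foldl max c := by
      have h := PySem.List.max?_isMax hmax
      simpa using h
    simp only [cotas_superiores_alt, hmax, Option.getD_some, hK]
    apply List.filter_congr
    intro n _hn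
    rw [Bool.eq_iff_iff]
    simp only [Bool.and_eq_true, decide_eq_true_eq, beq_iff_eq,
      PySem.Int.mod_eq_zero_iff_dvd, lcm_fold_dvd]
    constructor
    · intro h
      exact ⟨(h _ hm_mem).1, one_dvd n, fun e he => (h e he).2⟩
    · rintro ⟨hMn, _, hdvd⟩ e he
      exact ⟨lt_of_le_of_lt (hm_max e he) hMn, hdvd e he⟩
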